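-- pv_equiv track=rewrite | github.com/IlyaClewer/Incident_MVP_1_1 | backend/app/services/diagnosis_bulk_engine_service.py | build_indexes
-- ===== SOURCE A (Python) =====
-- from typing import Dict, Any, List, Set, Tuple
--
-- def build_indexes(
--     rows: List[Tuple[int, int, int | None]],
-- ) -> tuple[Dict[int, Set[int]], Dict[int, Dict[int, List[int]]]]:
--     """
--     rows: список (event_id, mh_rn, seq_numb)
--
--     Возвращает два индекса:
--       1) mhrn_to_event_nums: { mh_rn: {seq_numb1, seq_numb2, ...} }
--       2) mhrn_seq_to_event_ids: { mh_rn: { seq_numb: [event_id1, event_id2, ...] } }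
--     """
--     mhrn_to_event_nums: Dict[int, Set[int]] = {}
--     mhrn_seq_to_event_ids: Dict[int, Dict[int, List[int]]] = {}
--
--     for event_id, mh_rn, seq_numb in rows:
--         if seq_numb is None:
--             continue
--         seq = int(seq_numb)
--
--         nums_bucket = mhrn_to_event_nums.get(mh_rn)
--         if nums_bucket is None:
--             nums_bucket = set()
--             mhrn_to_event_nums[mh_rn] = nums_bucket
--         nums_bucket.add(seq)
--
--         seq_map = mhrn_seq_to_event_ids.get(mh_rn)
--         if seq_map is None:
--             seq_map = {}
--             mhrn_seq_to_event_ids[mh_rn] = seq_map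
--         ev_list = seq_map.get(seq)
--         if ev_list is None:
--             ev_list = []
--             seq_map[seq] = ev_list
--         ev_list.append(event_id)
--
--     return mhrn_to_event_nums, mhrn_seq_to_event_ids
-- ===== SOURCE B (Python) =====
-- def group_seqs(rows_m):
--     """Group one mh_rn's rows by seq: {seq: [event_id, ...]} (first-occurrence key order)."""
--     return {s: [e for (e, _, s2) in rows_m if s2 == s]
--             for s in dict.fromkeys(s2 for (_, _, s2) in rows_m)}
--
--
-- def build_indexes(rows):
--     present = [(e, m, s) for (e, m, s) in rows if s is not None]
--     mhrn_seq_to_event_ids = {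
--         m: group_seqs([r for r in present if r[1] == m])
--         for m in dict.fromkeys(m for (_, m, _) in present)
--     }
--     mhrn_to_event_nums = {m: set(seq_map) for m, seq_map in mhrn_seq_to_event_ids.items()}
--     return mhrn_to_event_nums, mhrn_seq_to_event_ids
-- ===== Notes on version B (the rewrite author's own statement) =====
-- stated objective: alternative
-- what changed: Instead of one pass that mutates two hash indexes row by row, B is staged comprehensions with no mutation: it filters out None seqs, computes the distinct mh_rns in first-occurrence order (dict.fromkeys), builds each inner seq->event_ids group by filtering that mh_rn's rows, and derives the seq-set index from the inner keys; the grouping is done by nested filtering scans rather than incremental dict updates.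
import Mathlib
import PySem

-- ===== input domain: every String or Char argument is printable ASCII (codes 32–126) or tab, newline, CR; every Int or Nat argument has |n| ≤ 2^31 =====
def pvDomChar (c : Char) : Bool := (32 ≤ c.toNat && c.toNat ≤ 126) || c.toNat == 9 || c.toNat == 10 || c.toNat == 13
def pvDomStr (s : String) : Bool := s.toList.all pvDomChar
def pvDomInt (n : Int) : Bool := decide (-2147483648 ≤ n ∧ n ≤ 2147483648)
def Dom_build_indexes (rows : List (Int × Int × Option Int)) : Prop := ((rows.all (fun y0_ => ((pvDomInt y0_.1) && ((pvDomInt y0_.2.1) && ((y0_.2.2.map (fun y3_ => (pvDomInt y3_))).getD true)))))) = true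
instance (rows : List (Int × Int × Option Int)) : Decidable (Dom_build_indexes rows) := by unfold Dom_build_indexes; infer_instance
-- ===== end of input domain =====

-- B replaces A's single pass that mutates two hash indexes with mutation-free staged
-- comprehensions: distinct keys via dict.fromkeys, groups by nested filtering scans
-- (objective: alternative).

-- ===== PORT A =====
-- one iteration of A's loop over (d1 = mhrn_to_event_nums, d2 = mhrn_seq_to_event_ids);
-- Python's in-place mutation of an aliased bucket is modelled by re-inserting the bucket at its key
def buildStepA (st : PySem.Dict Int (PySem.Set Int) × PySem.Dict Int (PySem.Dict Int (List Int)))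
    (row : Int × Int × Option Int) :
    PySem.Dict Int (PySem.Set Int) × PySem.Dict Int (PySem.Dict Int (List Int)) :=
  match row.2.2 with
  | none => st
  | some seq =>
    let event_id := row.1
    let mh_rn := row.2.1
    let d1 := st.1
    let d2 := st.2
    let p1 : PySem.Dict Int (PySem.Set Int) × PySem.Set Int :=
      match d1.get? mh_rn with
      | none => (d1.insert mh_rn PySem.Set.empty, PySem.Set.empty)
      | some b => (d1, b)
    let d1' := p1.1.insert mh_rn (PySem.Set.add p1.2 seq)
    let p2 : PySem.Dict Int (PySem.Dict Int (List Int)) × PySem.Dict Int (List Int) :=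
      match d2.get? mh_rn with
      | none => (d2.insert mh_rn PySem.Dict.empty, PySem.Dict.empty)
      | some m => (d2, m)
    let p3 : PySem.Dict Int (List Int) × List Int :=
      match p2.2.get? seq with
      | none => (p2.2.insert seq ([] : List Int), ([] : List Int))
      | some l => (p2.2, l)
    let seq_map' := p3.1.insert seq (p3.2 ++ [event_id])
    (d1', p2.1.insert mh_rn seq_map')

def build_indexes (rows : List (Int × Int × Option Int)) :
    (List (Int × List Int)) × (List (Int × List (Int × List Int))) :=
  let st := rows.foldl buildStepA (PySem.Dict.empty, PySem.Dict.empty)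
  (st.1.items, st.2.items.map (fun p => (p.1, p.2.items)))

-- ===== PORT B =====
-- group_seqs(rows_m): dict comprehension {s: [...] for s in dict.fromkeys(...)}
def groupSeqs (rows_m : List (Int × Int × Int)) : PySem.Dict Int (List Int) :=
  PySem.Dict.ofList ((PySem.List.dedup (rows_m.map (fun r => r.2.2))).map (fun s =>
    (s, (rows_m.filter (fun r => r.2.2 == s)).map (fun r => r.1))))

def build_indexes_alt (rows : List (Int × Int × Option Int)) :
    (List (Int × List Int)) × (List (Int × List (Int × List Int))) :=
  let present := rows.filterMap (fun r => r.2.2.map (fun s => (r.1, r.2.1, s)))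
  let mhrn_seq_to_event_ids : PySem.Dict Int (PySem.Dict Int (List Int)) :=
    PySem.Dict.ofList ((PySem.List.dedup (present.map (fun r => r.2.1))).map (fun m =>
      (m, groupSeqs (present.filter (fun r => r.2.1 == m)))))
  let mhrn_to_event_nums : PySem.Dict Int (PySem.Set Int) :=
    PySem.Dict.ofList (mhrn_seq_to_event_ids.items.map (fun p => (p.1, PySem.Set.ofList p.2.keys)))
  (mhrn_to_event_nums.items, mhrn_seq_to_event_ids.items.map (fun p => (p.1, p.2.items)))

-- ===== PRECONDITION & SPEC =====
def Spec_build_indexes (rows : List (Int × Int × Option Int)) (out : (List (Int × List Int)) × (List (Int × List (Int × List Int)))) : Prop := out = build_indexes_alt rows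
instance (rows : List (Int × Int × Option Int)) (out : (List (Int × List Int)) × (List (Int × List (Int × List Int)))) : Decidable (Spec_build_indexes rows out) := by unfold Spec_build_indexes; infer_instance

-- ===== CLAIM (what is proved, stated in full; the proofs are below) =====
def Claim_equal_build_indexes : Prop := ∀ (rows : List (Int × Int × Option Int)), Dom_build_indexes rows → Spec_build_indexes rows (build_indexes rows)

-- ===== LEMMAS AND PROOFS =====

-- A's loop with only the second (nested) accumulator
def buildStepB (d : PySem.Dict Int (PySem.Dict Int (List Int))) (row : Int × Int × Option Int) :
    PySem.Dict Int (PySem.Dict Int (List Int)) :=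
  match row.2.2 with
  | none => d
  | some seq =>
      d.modify row.2.1 PySem.Dict.empty (fun m => m.modify seq [] (fun l => l ++ [row.1]))

-- the same step on the already-filtered triples
def stepT (d : PySem.Dict Int (PySem.Dict Int (List Int))) (t : Int × Int × Int) :
    PySem.Dict Int (PySem.Dict Int (List Int)) :=
  d.modify t.2.1 PySem.Dict.empty (fun m => m.modify t.2.2 [] (fun l => l ++ [t.1]))

-- the derived first index: each inner dict replaced by the set of its keys
def deriveNums (d : PySem.Dict Int (PySem.Dict Int (List Int))) : PySem.Dict Int (PySem.Set Int) :=
  PySem.Dict.mk (d.items.map (fun p => (p.1, PySem.Set.ofList p.2.keys)))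

-- B's two grouping layers written with Dict.mk instead of Dict.ofList
def innerMk (us : List (Int × Int × Int)) : PySem.Dict Int (List Int) :=
  PySem.Dict.mk ((PySem.List.dedup (us.map (fun r => r.2.2))).map (fun s =>
    (s, (us.filter (fun r => r.2.2 == s)).map (fun r => r.1))))

def nestedMk (ts : List (Int × Int × Int)) : PySem.Dict Int (PySem.Dict Int (List Int)) :=
  PySem.Dict.mk ((PySem.List.dedup (ts.map (fun r => r.2.1))).map (fun m =>
    (m, innerMk (ts.filter (fun r => r.2.1 == m)))))

lemma deriveNums_get? (d : PySem.Dict Int (PySem.Dict Int (List Int))) (k : Int) :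
    (deriveNums d).get? k = (d.get? k).map (fun m => PySem.Set.ofList m.keys) := by
  obtain ⟨l⟩ := d
  induction l with
  | nil => rfl
  | cons p rest ih =>
      simp only [deriveNums, List.map_cons] at *
      rw [PySem.Dict.get?_mk_cons, PySem.Dict.get?_mk_cons]
      by_cases h : p.1 == k
      · simp [h]
      · simp only [h, Bool.false_eq_true, if_false]; exact ih

lemma deriveNums_keys (d : PySem.Dict Int (PySem.Dict Int (List Int))) :
    (deriveNums d).keys = d.keys := by
  obtain ⟨l⟩ := d
  simp [deriveNums, PySem.Dict.keys, List.map_map, Function.comp]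

lemma deriveNums_insert (d : PySem.Dict Int (PySem.Dict Int (List Int))) (k : Int)
    (m : PySem.Dict Int (List Int)) :
    deriveNums (d.insert k m) = (deriveNums d).insert k (PySem.Set.ofList m.keys) := by
  have hc : (deriveNums d).contains k = d.contains k := by
    by_cases h : k ∈ d.keys
    · rw [(PySem.Dict.contains_iff_mem_keys _ _).2 h,
        (PySem.Dict.contains_iff_mem_keys _ _).2 (by rw [deriveNums_keys]; exact h)]
    · have h1 : (deriveNums d).contains k = false := by
        rw [← Bool.not_eq_true, PySem.Dict.contains_iff_mem_keys, deriveNums_keys]; exact h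
      have h2 : d.contains k = false := by
        rw [← Bool.not_eq_true, PySem.Dict.contains_iff_mem_keys]; exact h
      rw [h1, h2]
  apply PySem.Dict.ext
  by_cases h : d.contains k = true
  · rw [PySem.Dict.items_insert_of_contains _ _ (hc.trans h)]
    simp only [deriveNums, PySem.Dict.items_insert_of_contains _ _ h, List.map_map]
    apply List.map_congr_left
    intro p _
    by_cases hp : p.1 == k
    · simp [Function.comp, hp]
    · simp [Function.comp, hp]
  · have h' : d.contains k = false := by revert h; cases d.contains k <;> simp
    rw [PySem.Dict.items_insert_of_not_contains _ _ (hc.trans h')]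
    simp [deriveNums, PySem.Dict.items_insert_of_not_contains _ _ h']

-- A's step, started at a state whose first component is derived from the second,
-- is the nested-only step with the derived first component
lemma stepA_eq (d : PySem.Dict Int (PySem.Dict Int (List Int))) (row : Int × Int × Option Int) :
    buildStepA (deriveNums d, d) row = (deriveNums (buildStepB d row), buildStepB d row) := by
  obtain ⟨e, k, seq?⟩ := row
  cases seq? with
  | none => rfl
  | some seq =>
      simp only [buildStepA, buildStepB]
      have hmod : d.modify k PySem.Dict.empty (fun m => m.modify seq [] (fun l => l ++ [e]))
          = d.insert k ((d.getD k PySem.Dict.empty).modify seq [] (fun l => l ++ [e])) := rfl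
      have hmod2 : ∀ (m : PySem.Dict Int (List Int)),
          m.modify seq [] (fun l => l ++ [e]) = m.insert seq (m.getD seq [] ++ [e]) :=
        fun m => rfl
      rw [hmod, hmod2, deriveNums_insert, deriveNums_get?]
      cases hk : d.get? k with
      | none =>
          have hkD : d.getD k PySem.Dict.empty = PySem.Dict.empty :=
            PySem.Dict.getD_of_get?_eq_none _ _ hk
          simp only [Option.map_none, hkD, PySem.Dict.get?_empty, PySem.Dict.getD_empty,
            List.nil_append]
          rw [PySem.Dict.insert_insert_self, PySem.Dict.insert_insert_self]
          have hkeys : (PySem.Dict.empty.insert seq ([e] : List Int)).keys = [seq] := by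
            rw [PySem.Dict.keys_insert_of_not_contains _ _ (PySem.Dict.contains_empty _)]
            simp [PySem.Dict.keys_empty]
          rw [hkeys]
          have hadd : PySem.Set.add PySem.Set.empty seq = PySem.Set.ofList [seq] := by
            simp [PySem.Set.ofList_cons, PySem.Set.ofList_nil,
              PySem.Set.empty, PySem.Set.discard]
          rw [hadd, PySem.Dict.insert_insert_self]
      | some m =>
          have hkD : d.getD k PySem.Dict.empty = m :=
            PySem.Dict.getD_of_get?_eq_some _ _ hk
          simp only [Option.map_some, hkD]
          cases hs : m.get? seq with
          | none =>
              have hsD : m.getD seq [] = [] := PySem.Dict.getD_of_get?_eq_none _ _ hs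
              have hsc : m.contains seq = false := by
                rw [PySem.Dict.contains_eq_isSome_get?, hs]; rfl
              simp only [hsD]
              rw [PySem.Dict.insert_insert_self,
                PySem.Dict.keys_insert_of_not_contains _ _ hsc,
                PySem.Set.ofList_append_singleton]
          | some l =>
              have hsD : m.getD seq [] = l := PySem.Dict.getD_of_get?_eq_some _ _ hs
              have hsc : m.contains seq = true := by
                rw [PySem.Dict.contains_eq_isSome_get?, hs]; rfl
              simp only [hsD]
              rw [PySem.Dict.keys_insert_of_contains _ _ hsc]
              have : PySem.Set.add (PySem.Set.ofList m.keys) seq = PySem.Set.ofList m.keys := by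
                apply PySem.Set.add_of_mem
                rw [PySem.Set.mem_ofList, ← PySem.Dict.contains_iff_mem_keys]
                exact hsc
              rw [this]

lemma foldA_eq (rows : List (Int × Int × Option Int)) (d : PySem.Dict Int (PySem.Dict Int (List Int))) :
    rows.foldl buildStepA (deriveNums d, d)
      = (deriveNums (rows.foldl buildStepB d), rows.foldl buildStepB d) := by
  induction rows generalizing d with
  | nil => rfl
  | cons r rs ih => rw [List.foldl_cons, List.foldl_cons, stepA_eq, ih]

-- skipping the None rows first and then folding is the same fold
lemma foldB_eq_foldT (rows : List (Int × Int × Option Int))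
    (d : PySem.Dict Int (PySem.Dict Int (List Int))) :
    rows.foldl buildStepB d
      = (rows.filterMap (fun r => r.2.2.map (fun s => (r.1, r.2.1, s)))).foldl stepT d := by
  induction rows generalizing d with
  | nil => rfl
  | cons r rs ih =>
      obtain ⟨e, k, s?⟩ := r
      cases s? with
      | none => simpa [buildStepB] using ih d
      | some s =>
          rw [List.foldl_cons]
          have : (((e, k, some s) :: rs).filterMap (fun r => r.2.2.map (fun s => (r.1, r.2.1, s))))
              = (e, k, s) :: rs.filterMap (fun r => r.2.2.map (fun s => (r.1, r.2.1, s))) := by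
            simp
          rw [this, List.foldl_cons]
          exact ih _

lemma dedup_append_singleton (xs : List Int) (x : Int) :
    PySem.List.dedup (xs ++ [x])
      = if x ∈ xs then PySem.List.dedup xs else PySem.List.dedup xs ++ [x] := by
  simp [PySem.List.dedup_eq_ofList, PySem.Set.ofList_append_singleton, PySem.Set.add_eq_ite,
    PySem.Set.mem_ofList]

lemma fst_map_pair {ν : Type} (f : Int → ν) (ms : List Int) :
    (ms.map (fun m => (m, f m))).map Prod.fst = ms := by
  simp [List.map_map, Function.comp_def]

lemma get?_mk_map {ν : Type} (f : Int → ν) (ms : List Int) (k : Int) :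
    (PySem.Dict.mk (ms.map (fun m => (m, f m)))).get? k
      = if k ∈ ms then some (f k) else none := by
  induction ms with
  | nil => rfl
  | cons m rest ih =>
      rw [List.map_cons, PySem.Dict.get?_mk_cons]
      by_cases h : m = k
      · simp [h]
      · have : (m == k) = false := by simp [h]
        simp [this, ih, Ne.symm h]

lemma contains_mk_map {ν : Type} (f : Int → ν) (ms : List Int) (k : Int) :
    (PySem.Dict.mk (ms.map (fun m => (m, f m)))).contains k = decide (k ∈ ms) := by
  by_cases h : k ∈ ms
  · simp only [h, decide_true]
    rw [PySem.Dict.contains_iff_mem_keys]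
    simp only [PySem.Dict.keys_mk, fst_map_pair]
    exact h
  · simp only [h, decide_false]
    rw [← Bool.not_eq_true, PySem.Dict.contains_iff_mem_keys]
    simp only [PySem.Dict.keys_mk, fst_map_pair]
    exact h

lemma mk_map_update {ν : Type} (ms : List Int) (f f' : Int → ν) (k : Int) (v : ν)
    (hk : k ∈ ms) (hf : ∀ m ∈ ms, m ≠ k → f' m = f m) (hv : f' k = v) :
    (PySem.Dict.mk (ms.map (fun m => (m, f m)))).insert k v
      = PySem.Dict.mk (ms.map (fun m => (m, f' m))) := by
  have hc : (PySem.Dict.mk (ms.map (fun m => (m, f m)))).contains k = true := by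
    rw [contains_mk_map]; simpa using hk
  apply PySem.Dict.ext
  rw [PySem.Dict.items_insert_of_contains _ _ hc]
  show ((ms.map (fun m => (m, f m))).map (fun p => if p.1 == k then (k, v) else p))
      = ms.map (fun m => (m, f' m))
  rw [List.map_map]
  apply List.map_congr_left
  intro m hm
  by_cases h : m = k
  · simp [Function.comp, h, ← hv]
  · have hb : (m == k) = false := by simp [h]
    simp [Function.comp, hb, hf m hm h]

lemma mk_map_append {ν : Type} (ms : List Int) (f f' : Int → ν) (k : Int) (v : ν)
    (hk : k ∉ ms) (hf : ∀ m ∈ ms, f' m = f m) (hv : f' k = v) :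
    (PySem.Dict.mk (ms.map (fun m => (m, f m)))).insert k v
      = PySem.Dict.mk ((ms ++ [k]).map (fun m => (m, f' m))) := by
  have hc : (PySem.Dict.mk (ms.map (fun m => (m, f m)))).contains k = false := by
    rw [contains_mk_map]; simpa using hk
  apply PySem.Dict.ext
  rw [PySem.Dict.items_insert_of_not_contains _ _ hc]
  show (ms.map (fun m => (m, f m))) ++ [(k, v)] = (ms ++ [k]).map (fun m => (m, f' m))
  rw [List.map_append]
  congr 1
  · exact (List.map_congr_left (fun m hm => by rw [hf m hm])).symm
  · simp [hv]

lemma innerMk_append (us : List (Int × Int × Int)) (u : Int × Int × Int) :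
    innerMk (us ++ [u])
      = (innerMk us).insert u.2.2 ((innerMk us).getD u.2.2 [] ++ [u.1]) := by
  obtain ⟨e, m0, s⟩ := u
  simp only [innerMk, List.map_append, List.map_cons, List.map_nil]
  rw [dedup_append_singleton]
  by_cases hs : s ∈ us.map (fun r => r.2.2)
  · rw [if_pos hs]
    have hget : (PySem.Dict.mk ((PySem.List.dedup (us.map (fun r => r.2.2))).map (fun s' =>
        (s', (us.filter (fun r => r.2.2 == s')).map (fun r => r.1))))).getD s []
        = (us.filter (fun r => r.2.2 == s)).map (fun r => r.1) := by
      rw [PySem.Dict.getD_eq_get?_getD, get?_mk_map]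
      simp [hs]
    rw [hget]
    refine (mk_map_update _ _ _ _ _ (by simpa [PySem.List.mem_dedup] using hs) ?_ ?_).symm
    · intro s' _ hne
      rw [List.filter_append]
      have : (((e, m0, s) : Int × Int × Int).2.2 == s') = false := by simpa using hne.symm
      simp [this]
    · rw [List.filter_append]
      simp
  · rw [if_neg hs]
    have hget : (PySem.Dict.mk ((PySem.List.dedup (us.map (fun r => r.2.2))).map (fun s' =>
        (s', (us.filter (fun r => r.2.2 == s')).map (fun r => r.1))))).getD s []
        = [] := by
      rw [PySem.Dict.getD_eq_get?_getD, get?_mk_map]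
      simp [hs]
    rw [hget]
    refine (mk_map_append _ _ _ _ _ (by simpa [PySem.List.mem_dedup] using hs) ?_ ?_).symm
    · intro s' hs'
      have hs'mem : s' ∈ us.map (fun r => r.2.2) := by
        simpa [PySem.List.mem_dedup] using hs'
      have hne : s ≠ s' := fun h => hs (h ▸ hs'mem)
      rw [List.filter_append]
      have : (((e, m0, s) : Int × Int × Int).2.2 == s') = false := by simpa using hne
      simp [this]
    · have hnil : us.filter (fun r => r.2.2 == s) = [] := by
        rw [List.filter_eq_nil_iff]
        intro r hr hbeq
        have hx : r.2.2 = s := by simpa using hbeq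
        exact hs (hx ▸ List.mem_map_of_mem hr)
      rw [List.filter_append, hnil]
      simp

lemma stepT_insert (d : PySem.Dict Int (PySem.Dict Int (List Int))) (t : Int × Int × Int) :
    stepT d t = d.insert t.2.1 ((d.getD t.2.1 PySem.Dict.empty).insert t.2.2
      ((d.getD t.2.1 PySem.Dict.empty).getD t.2.2 [] ++ [t.1])) := rfl

lemma foldT_eq_nestedMk (ts : List (Int × Int × Int)) :
    ts.foldl stepT PySem.Dict.empty = nestedMk ts := by
  induction ts using List.reverseRecOn with
  | nil => rfl
  | append_singleton ts t ih =>
      rw [List.foldl_append, List.foldl_cons, List.foldl_nil, ih, stepT_insert]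
      obtain ⟨e, m, s⟩ := t
      simp only [nestedMk, List.map_append, List.map_cons, List.map_nil]
      rw [dedup_append_singleton]
      by_cases hm : m ∈ ts.map (fun r => r.2.1)
      · rw [if_pos hm]
        have hget : (PySem.Dict.mk ((PySem.List.dedup (ts.map (fun r => r.2.1))).map (fun m' =>
            (m', innerMk (ts.filter (fun r => r.2.1 == m')))))).getD m PySem.Dict.empty
            = innerMk (ts.filter (fun r => r.2.1 == m)) := by
          rw [PySem.Dict.getD_eq_get?_getD, get?_mk_map]
          simp [hm]
        rw [hget]
        refine mk_map_update _ _ _ _ _ (by simpa [PySem.List.mem_dedup] using hm) ?_ ?_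
        · intro m' _ hne
          rw [List.filter_append]
          have : (((e, m, s) : Int × Int × Int).2.1 == m') = false := by simpa using hne.symm
          simp [this]
        · rw [List.filter_append]
          have hf1 : List.filter (fun r => r.2.1 == m) [((e, m, s) : Int × Int × Int)]
              = [(e, m, s)] := by simp
          rw [hf1]
          exact innerMk_append (ts.filter (fun r => r.2.1 == m)) (e, m, s)
      · rw [if_neg hm]
        have hget : (PySem.Dict.mk ((PySem.List.dedup (ts.map (fun r => r.2.1))).map (fun m' =>
            (m', innerMk (ts.filter (fun r => r.2.1 == m')))))).getD m PySem.Dict.empty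
            = PySem.Dict.empty := by
          rw [PySem.Dict.getD_eq_get?_getD, get?_mk_map]
          simp [hm]
        rw [hget]
        refine mk_map_append _ _ _ _ _ (by simpa [PySem.List.mem_dedup] using hm) ?_ ?_
        · intro m' hm'
          have hmem : m' ∈ ts.map (fun r => r.2.1) := by
            simpa [PySem.List.mem_dedup] using hm'
          have hne : m ≠ m' := fun h => hm (h ▸ hmem)
          rw [List.filter_append]
          have : (((e, m, s) : Int × Int × Int).2.1 == m') = false := by simpa using hne
          simp [this]
        · have hnil : ts.filter (fun r => r.2.1 == m) = [] := by
            rw [List.filter_eq_nil_iff]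
            intro r hr hbeq
            have hx : r.2.1 = m := by simpa using hbeq
            exact hm (hx ▸ List.mem_map_of_mem hr)
          rw [List.filter_append, hnil]
          have h1 : List.filter (fun r => r.2.1 == m) [((e, m, s) : Int × Int × Int)]
              = [(e, m, s)] := by simp
          rw [List.nil_append, h1]
          have h2 := innerMk_append ([] : List (Int × Int × Int)) (e, m, s)
          have h0 : (innerMk ([] : List (Int × Int × Int))).getD s [] = [] := rfl
          simpa [h0] using h2

lemma ofList_eq_mk_of_nodup {ν : Type} (l : List (Int × ν)) (h : (l.map Prod.fst).Nodup) :
    PySem.Dict.ofList l = PySem.Dict.mk l := by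
  induction l using List.reverseRecOn with
  | nil => rfl
  | append_singleton l p ih =>
      rw [List.map_append] at h
      have hn : (l.map Prod.fst).Nodup := (List.nodup_append.1 h).1
      have hp : p.1 ∉ l.map Prod.fst := by
        intro hmem
        rcases List.nodup_append.1 h with ⟨_, _, hdisj⟩
        exact hdisj p.1 hmem p.1 (by simp) rfl
      have hofl : PySem.Dict.ofList (l ++ [p]) = (PySem.Dict.ofList l).insert p.1 p.2 := by
        show (l ++ [p]).foldl (fun d q => d.insert q.1 q.2) PySem.Dict.empty = _
        rw [List.foldl_append]; rfl
      rw [hofl, ih hn]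
      have hc : (PySem.Dict.mk l).contains p.1 = false := by
        rw [← Bool.not_eq_true, PySem.Dict.contains_iff_mem_keys]
        simpa [PySem.Dict.keys_mk] using hp
      apply PySem.Dict.ext
      rw [PySem.Dict.items_insert_of_not_contains _ _ hc]

lemma groupSeqs_eq_innerMk (us : List (Int × Int × Int)) : groupSeqs us = innerMk us := by
  rw [groupSeqs, innerMk]
  apply ofList_eq_mk_of_nodup
  rw [fst_map_pair]
  exact PySem.List.nodup_dedup _

-- ===== VERDICT (by name: the statement is the Claim_ definition above) =====
theorem build_indexes_spec : Claim_equal_build_indexes := by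
  intro rows _
  show build_indexes rows = build_indexes_alt rows
  have h0 : ((PySem.Dict.empty : PySem.Dict Int (PySem.Set Int)),
      (PySem.Dict.empty : PySem.Dict Int (PySem.Dict Int (List Int))))
      = (deriveNums PySem.Dict.empty, PySem.Dict.empty) := rfl
  have hD : rows.foldl buildStepB PySem.Dict.empty
      = nestedMk (rows.filterMap (fun r => r.2.2.map (fun s => (r.1, r.2.1, s)))) := by
    rw [foldB_eq_foldT, foldT_eq_nestedMk]
  have hnested : PySem.Dict.ofList
      ((PySem.List.dedup ((rows.filterMap (fun r => r.2.2.map (fun s => (r.1, r.2.1, s)))).map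
        (fun r => r.2.1))).map (fun m =>
        (m, groupSeqs ((rows.filterMap (fun r => r.2.2.map (fun s => (r.1, r.2.1, s)))).filter
          (fun r => r.2.1 == m)))))
      = nestedMk (rows.filterMap (fun r => r.2.2.map (fun s => (r.1, r.2.1, s)))) := by
    rw [nestedMk]
    have hrw : ∀ ms : List Int, ms.map (fun m =>
        (m, groupSeqs ((rows.filterMap (fun r => r.2.2.map (fun s => (r.1, r.2.1, s)))).filter
          (fun r => r.2.1 == m))))
        = ms.map (fun m =>
        (m, innerMk ((rows.filterMap (fun r => r.2.2.map (fun s => (r.1, r.2.1, s)))).filter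
          (fun r => r.2.1 == m)))) := by
      intro ms
      exact List.map_congr_left (fun m _ => by rw [groupSeqs_eq_innerMk])
    rw [hrw]
    apply ofList_eq_mk_of_nodup
    rw [fst_map_pair]
    exact PySem.List.nodup_dedup _
  have hnums : ∀ N : PySem.Dict Int (PySem.Dict Int (List Int)), N.keys.Nodup →
      PySem.Dict.ofList (N.items.map (fun p => (p.1, PySem.Set.ofList p.2.keys)))
      = deriveNums N := by
    intro N hnd
    rw [deriveNums]
    apply ofList_eq_mk_of_nodup
    have : (N.items.map (fun p => (p.1, PySem.Set.ofList p.2.keys))).map Prod.fst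
        = N.items.map Prod.fst := by
      rw [List.map_map]; rfl
    rw [this]
    exact hnd
  have hndN : (nestedMk (rows.filterMap (fun r => r.2.2.map (fun s => (r.1, r.2.1, s))))).keys.Nodup := by
    rw [nestedMk]
    simp only [PySem.Dict.keys_mk, fst_map_pair]
    exact PySem.List.nodup_dedup _
  simp only [build_indexes, build_indexes_alt, h0, foldA_eq, hD, hnested, hnums _ hndN]
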